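-- pv_equiv track=rewrite | github.com/huynhminhtruong/py | cp/code_signal/problems.py | squareDigitsSequence
-- ===== SOURCE A (Python) =====
-- def squareDigitsSequence(n):
--     cnt, a = 1, list()
--     a.append(n)
--     while True:
--         a.append(sum([int(i) ** 2 for i in str(a[-1])]))
--         cnt += 1
--         if a.count(a[-1]) > 1:
--             break
--     return cnt
-- ===== SOURCE B (Python) =====
-- def squareDigitsSequence(n):
--     def step(x):
--         return sum(int(d) ** 2 for d in str(x))
--     # Floyd cycle detection on the orbit n, step(n), step(step(n)), ...
--     slow, fast = step(n), step(step(n))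
--     while slow != fast:
--         slow, fast = step(slow), step(step(fast))
--     mu, slow = 0, n
--     while slow != fast:
--         mu += 1
--         slow, fast = step(slow), step(fast)
--     lam, fast = 1, step(slow)
--     while slow != fast:
--         lam += 1
--         fast = step(fast)
--     return mu + lam + 1
-- ===== Notes on version B (the rewrite author's own statement) =====
-- stated objective: alternative
-- what changed: B replaces A's growing history list re-scanned with list.count at every step by Floyd's tortoise-and-hare cycle detection in O(1) memory: it finds a meeting point, then the tail length mu and cycle length lambda, and returns mu + lambda + 1, which equals A's list length at the first repeat.
import Mathlib
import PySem

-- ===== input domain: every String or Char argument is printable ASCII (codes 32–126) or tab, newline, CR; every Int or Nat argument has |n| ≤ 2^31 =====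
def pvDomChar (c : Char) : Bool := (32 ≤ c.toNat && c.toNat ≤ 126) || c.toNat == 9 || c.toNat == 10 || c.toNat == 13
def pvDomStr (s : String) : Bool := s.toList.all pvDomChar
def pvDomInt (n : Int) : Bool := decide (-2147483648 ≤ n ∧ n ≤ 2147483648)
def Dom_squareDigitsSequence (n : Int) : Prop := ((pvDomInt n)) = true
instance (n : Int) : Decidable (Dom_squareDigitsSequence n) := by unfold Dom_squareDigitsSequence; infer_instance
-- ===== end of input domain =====

-- B replaces A's growing history list re-scanned with list.count at each step by Floyd's
-- tortoise-and-hare cycle detection (constant memory): meeting point, tail length mu,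
-- cycle length lambda, returning mu + lambda + 1 (objective: alternative).

-- ===== PORT A =====
-- sum([int(i) ** 2 for i in str(v)]); int('-') raises ValueError, excluded by Pre_ (0 ≤ n),
-- so the .getD 0 default is never the value on admitted inputs
def pvStepA (v : Int) : Int :=
  (((PySem.Int.toStr v).toList).map
    (fun c => ((PySem.Int.ofStr? (String.ofList [c])).getD 0) ^ 2)).sum

-- the 'while True' loop of A; the fuel only makes it total (at fuel 0 it returns the current cnt)
def pvALoop : Nat → List Int → Int → Int
  | 0, _, cnt => cnt
  | fuel + 1, a, cnt =>
    let nxt := pvStepA ((PySem.List.pyGet? a (-1)).getD 0)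
    let a' := a ++ [nxt]
    let cnt' := cnt + 1
    if PySem.List.count a' ((PySem.List.pyGet? a' (-1)).getD 0) > 1 then cnt'
    else pvALoop fuel a' cnt'

def squareDigitsSequence (n : Int) : Int := pvALoop 1000000 [n] 1

-- ===== PORT B =====
-- def step(x): return sum(int(d) ** 2 for d in str(x))   (same helper as in Source B)
def pvStepB (v : Int) : Int :=
  (((PySem.Int.toStr v).toList).map
    (fun c => ((PySem.Int.ofStr? (String.ofList [c])).getD 0) ^ 2)).sum

-- phase 1: while slow != fast: slow, fast = step(slow), step(step(fast)); fuel only makes it total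
def pvFloyd1 : Nat → Int → Int → Int
  | 0, _, fast => fast
  | f + 1, slow, fast =>
    if slow = fast then fast else pvFloyd1 f (pvStepB slow) (pvStepB (pvStepB fast))

-- phase 2: while slow != fast: mu += 1; slow, fast = step(slow), step(fast); returns (mu, slow)
def pvFloyd2 : Nat → Int → Int → Int → Int × Int
  | 0, m, slow, _ => (m, slow)
  | f + 1, m, slow, fast =>
    if slow = fast then (m, slow) else pvFloyd2 f (m + 1) (pvStepB slow) (pvStepB fast)

-- phase 3: lam, fast = 1, step(slow); while slow != fast: lam += 1; fast = step(fast)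
def pvFloyd3 : Nat → Int → Int → Int → Int
  | 0, l, _, _ => l
  | f + 1, l, slow, fast =>
    if slow = fast then l else pvFloyd3 f (l + 1) slow (pvStepB fast)

def squareDigitsSequence_alt (n : Int) : Int :=
  let fast0 := pvFloyd1 1000000 (pvStepB n) (pvStepB (pvStepB n))
  let p := pvFloyd2 1000000 0 n fast0
  p.1 + pvFloyd3 1000000 1 p.2 (pvStepB p.2) + 1

-- ===== PRECONDITION & SPEC =====
-- Python A raises ValueError for negative n (int cannot parse the sign character of str(n));
-- it returns on every nonnegative n (B raises there in exactly the same way).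
def Pre_squareDigitsSequence (n : Int) : Prop := 0 ≤ n
instance (n : Int) : Decidable (Pre_squareDigitsSequence n) := by unfold Pre_squareDigitsSequence; infer_instance
def pvWitness_squareDigitsSequence : Int := 19

def Spec_squareDigitsSequence (n : Int) (out : Int) : Prop := out = squareDigitsSequence_alt n
instance (n : Int) (out : Int) : Decidable (Spec_squareDigitsSequence n out) := by unfold Spec_squareDigitsSequence; infer_instance

-- ===== CLAIM (what is proved, stated in full; the proofs are below) =====
def Claim_equal_squareDigitsSequence : Prop := ∀ (n : Int), Dom_squareDigitsSequence n → Pre_squareDigitsSequence n → Spec_squareDigitsSequence n (squareDigitsSequence n)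

-- ===== LEMMAS AND PROOFS =====

-- the mathematical content of the step: the sum of squared decimal digits
def pvSqDigits (m : Nat) : Int :=
  if h : m = 0 then 0 else pvSqDigits (m / 10) + ((m % 10 : Nat) : Int) ^ 2
decreasing_by omega

theorem pvSqDigits_nonneg (m : Nat) : 0 ≤ pvSqDigits m := by
  induction m using Nat.strong_induction_on with
  | _ m ih =>
    rw [pvSqDigits]
    split_ifs with h
    · exact le_refl 0
    · have := ih (m / 10) (by omega)
      positivity

theorem pvSqDigits_le (k : Nat) : ∀ m, m < 10 ^ k → pvSqDigits m ≤ 81 * (k : Int) := by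
  induction k with
  | zero =>
    intro m hm
    have : m = 0 := by simpa using hm
    subst this
    rw [pvSqDigits]
    simp
  | succ k ih =>
    intro m hm
    rw [pvSqDigits]
    split_ifs with h
    · positivity
    · have hdiv : m / 10 < 10 ^ k := by
        rw [pow_succ] at hm
        omega
      have h1 := ih (m / 10) hdiv
      have h9 : m % 10 ≤ 9 := by omega
      have h9' : ((m % 10 : Nat) : Int) ≤ 9 := by exact_mod_cast h9
      have h0' : (0 : Int) ≤ ((m % 10 : Nat) : Int) := by positivity
      have hsq : ((m % 10 : Nat) : Int) ^ 2 ≤ 81 := by nlinarith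
      have hc : ((k + 1 : Nat) : Int) = (k : Int) + 1 := by push_cast; ring
      rw [hc]
      linarith

theorem pv_digitVal (d : Nat) (hd : d < 10) :
    (PySem.Int.ofStr? (String.ofList [Nat.digitChar d])).getD 0 = (d : Int) := by
  revert d; decide

theorem pv_toDigitsCore_sum (f : Nat) : ∀ (m : Nat) (acc : List Char), m < f →
    ((Nat.toDigitsCore 10 f m acc).map
      (fun c => ((PySem.Int.ofStr? (String.ofList [c])).getD 0) ^ 2)).sum
    = pvSqDigits m
      + ((acc.map (fun c => ((PySem.Int.ofStr? (String.ofList [c])).getD 0) ^ 2)).sum) := by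
  induction f with
  | zero => intro m acc h; omega
  | succ f ih =>
    intro m acc h
    simp only [Nat.toDigitsCore]
    by_cases h0 : m / 10 = 0
    · rw [if_pos h0]
      have hm : m < 10 := by omega
      rw [List.map_cons, List.sum_cons, pv_digitVal (m % 10) (by omega)]
      rw [pvSqDigits]
      split_ifs with hz
      · subst hz; simp
      · rw [pvSqDigits]
        simp [h0]
    · rw [if_neg h0]
      have hdiv : m / 10 < m := Nat.div_lt_self (by omega) (by omega)
      rw [ih (m / 10) _ (by omega)]
      rw [List.map_cons, List.sum_cons, pv_digitVal (m % 10) (by omega)]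
      conv_rhs => rw [pvSqDigits]
      split_ifs with hz
      · omega
      · ring

theorem pvStepA_eq (x : Int) (hx : 0 ≤ x) : pvStepA x = pvSqDigits x.toNat := by
  unfold pvStepA
  rw [PySem.Int.toList_toStr]
  unfold PySem.Int.toChars
  rw [if_neg (by omega)]
  unfold Nat.toDigits
  rw [pv_toDigitsCore_sum (x.toNat + 1) x.toNat [] (by omega)]
  simp

-- the orbit n, step(n), step(step(n)), …
def pvSeq (n : Int) : Nat → Int
  | 0 => n
  | i + 1 => pvStepA (pvSeq n i)

theorem pvSeq_succ (n : Int) (i : Nat) : pvSeq n (i + 1) = pvStepA (pvSeq n i) := rfl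

theorem pv_seq_bound (n : Int) (h0 : 0 ≤ n) (hB : n ≤ 2147483648) :
    ∀ i, 0 ≤ pvSeq n (i + 1) ∧ pvSeq n (i + 1) ≤ 810 := by
  intro i
  induction i with
  | zero =>
    rw [pvSeq_succ]
    show 0 ≤ pvStepA (pvSeq n 0) ∧ _
    rw [show pvSeq n 0 = n from rfl, pvStepA_eq n h0]
    refine ⟨pvSqDigits_nonneg _, ?_⟩
    have h10 : (10 : Nat) ^ 10 = 10000000000 := by norm_num
    have := pvSqDigits_le 10 n.toNat (by rw [h10]; omega)
    norm_num at this
    linarith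
  | succ i ih =>
    rw [pvSeq_succ, pvStepA_eq _ ih.1]
    refine ⟨pvSqDigits_nonneg _, ?_⟩
    have h3 : (10 : Nat) ^ 3 = 1000 := by norm_num
    have := pvSqDigits_le 3 (pvSeq n (i + 1)).toNat (by rw [h3]; omega)
    norm_num at this
    linarith

-- existence of the tail/cycle decomposition, by pigeonhole on the bounded orbit
theorem pv_exists_cycle (n : Int) (h0 : 0 ≤ n) (hB : n ≤ 2147483648) :
    ∃ mu lam, 1 ≤ lam ∧ mu + lam ≤ 813 ∧
      (∀ i, mu ≤ i → pvSeq n (i + lam) = pvSeq n i) ∧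
      (∀ i j, i < mu + lam → j < mu + lam → pvSeq n i = pvSeq n j → i = j) := by
  have hbnd := pv_seq_bound n h0 hB
  have hmaps : ∀ i ∈ Finset.range 812, pvSeq n (i + 1) ∈ Finset.Icc (0 : Int) 810 := by
    intro i _
    simp only [Finset.mem_Icc]
    exact hbnd i
  have hcard : (Finset.Icc (0 : Int) 810).card < (Finset.range 812).card := by
    rw [Int.card_Icc, Finset.card_range]
    decide
  obtain ⟨x, hx, y, hy, hne, heq⟩ :=
    Finset.exists_ne_map_eq_of_card_lt_of_maps_to hcard hmaps
  simp only [Finset.mem_range] at hx hy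
  -- some index ≤ 812 repeats an earlier value
  have hex : ∃ m, ∃ t, t < m ∧ pvSeq n t = pvSeq n m := by
    rcases Nat.lt_or_ge x y with hlt | hge
    · exact ⟨y + 1, x + 1, by omega, heq⟩
    · exact ⟨x + 1, y + 1, by omega, heq.symm⟩
  set S : Set Nat := {m | ∃ t, t < m ∧ pvSeq n t = pvSeq n m} with hS
  have hexS : S.Nonempty := hex
  have hNmem : sInf S ∈ S := Nat.sInf_mem hexS
  have hNle : sInf S ≤ 812 := by
    rcases Nat.lt_or_ge x y with hlt | hge
    · exact le_trans (Nat.sInf_le ⟨x + 1, by omega, heq⟩) (by omega)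
    · exact le_trans (Nat.sInf_le ⟨y + 1, by omega, heq.symm⟩) (by omega)
  obtain ⟨t, htlt, hteq⟩ := hNmem
  refine ⟨t, sInf S - t, ?_, ?_, ?_, ?_⟩
  · omega
  · omega
  · -- periodicity from the first repeat, by induction from i = t upward
    intro i hi
    induction i, hi using Nat.le_induction with
    | base =>
      rw [show t + (sInf S - t) = sInf S by omega]
      exact hteq.symm
    | succ i hi ihp =>
      rw [show i + 1 + (sInf S - t) = (i + (sInf S - t)) + 1 by omega,
          pvSeq_succ, pvSeq_succ, ihp]
  · -- injectivity below the first repeat index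
    intro i j hi hj hij
    rw [show t + (sInf S - t) = sInf S by omega] at hi hj
    by_contra hne'
    rcases Nat.lt_or_ge i j with hlt | hge
    · have hmem : j ∈ S := ⟨i, hlt, hij⟩
      have := Nat.sInf_le hmem
      omega
    · have hlt : j < i := by omega
      have hmem : i ∈ S := ⟨j, hlt, hij.symm⟩
      have := Nat.sInf_le hmem
      omega

theorem pv_per_mul (n : Int) (mu lam : Nat)
    (hper : ∀ i, mu ≤ i → pvSeq n (i + lam) = pvSeq n i) :
    ∀ k i, mu ≤ i → pvSeq n (i + k * lam) = pvSeq n i := by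
  intro k
  induction k with
  | zero => intro i _; simp
  | succ k ih =>
    intro i hi
    rw [show i + (k + 1) * lam = (i + k * lam) + lam by ring,
        hper (i + k * lam) (by omega), ih i hi]

theorem pv_reduce (n : Int) (mu lam : Nat) (hlam : 1 ≤ lam)
    (hper : ∀ i, mu ≤ i → pvSeq n (i + lam) = pvSeq n i) :
    ∀ a, mu ≤ a → pvSeq n a = pvSeq n (mu + (a - mu) % lam) := by
  intro a ha
  have hmd := Nat.mod_add_div' (a - mu) lam
  have key : pvSeq n ((mu + (a - mu) % lam) + ((a - mu) / lam) * lam)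
      = pvSeq n (mu + (a - mu) % lam) :=
    pv_per_mul n mu lam hper ((a - mu) / lam) _ (by omega)
  conv_lhs => rw [show a = (mu + (a - mu) % lam) + ((a - mu) / lam) * lam by omega]
  exact key

-- full characterisation of coincidences in the orbit
theorem pv_char (n : Int) (mu lam : Nat) (hlam : 1 ≤ lam)
    (hper : ∀ i, mu ≤ i → pvSeq n (i + lam) = pvSeq n i)
    (hinj : ∀ i j, i < mu + lam → j < mu + lam → pvSeq n i = pvSeq n j → i = j) :
    ∀ a b, pvSeq n a = pvSeq n b ↔ (a = b ∨ (mu ≤ a ∧ mu ≤ b ∧ a % lam = b % lam)) := by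
  intro a b
  constructor
  · intro h
    by_cases ha : a < mu <;> by_cases hb : b < mu
    · left; exact hinj a b (by omega) (by omega) h
    · exfalso
      have hb' : mu ≤ b := by omega
      have hrb := pv_reduce n mu lam hlam hper b hb'
      have hmod : (b - mu) % lam < lam := Nat.mod_lt _ (by omega)
      have := hinj a (mu + (b - mu) % lam) (by omega) (by omega) (h.trans hrb)
      omega
    · exfalso
      have ha' : mu ≤ a := by omega
      have hra := pv_reduce n mu lam hlam hper a ha'
      have hmod : (a - mu) % lam < lam := Nat.mod_lt _ (by omega)
      have := hinj (mu + (a - mu) % lam) b (by omega) (by omega) (hra.symm.trans h)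
      omega
    · right
      have ha' : mu ≤ a := by omega
      have hb' : mu ≤ b := by omega
      have hra := pv_reduce n mu lam hlam hper a ha'
      have hrb := pv_reduce n mu lam hlam hper b hb'
      have hma : (a - mu) % lam < lam := Nat.mod_lt _ (by omega)
      have hmb : (b - mu) % lam < lam := Nat.mod_lt _ (by omega)
      have hmeq := hinj (mu + (a - mu) % lam) (mu + (b - mu) % lam)
        (by omega) (by omega) (hra.symm.trans (h.trans hrb))
      have h1 : (a - mu) % lam = (b - mu) % lam := by omega
      have h2 : (a - mu) ≡ (b - mu) [MOD lam] := h1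
      have h3 : mu + (a - mu) ≡ mu + (b - mu) [MOD lam] := Nat.ModEq.add_left mu h2
      rw [show mu + (a - mu) = a by omega, show mu + (b - mu) = b by omega] at h3
      exact ⟨ha', hb', h3⟩
  · rintro (rfl | ⟨ha, hb, hmod⟩)
    · rfl
    · have h1 : (a - mu) % lam = (b - mu) % lam := by
        rcases le_total a b with hab | hab
        · have hd : lam ∣ b - a := (Nat.modEq_iff_dvd' hab).mp hmod
          have hd' : lam ∣ (b - mu) - (a - mu) := by
            rwa [show (b - mu) - (a - mu) = b - a by omega]
          exact (Nat.modEq_iff_dvd' (by omega)).mpr hd'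
        · have hd : lam ∣ a - b := (Nat.modEq_iff_dvd' hab).mp (Nat.ModEq.symm hmod)
          have hd' : lam ∣ (a - mu) - (b - mu) := by
            rwa [show (a - mu) - (b - mu) = a - b by omega]
          exact ((Nat.modEq_iff_dvd' (by omega)).mpr hd').symm
      rw [pv_reduce n mu lam hlam hper a ha, pv_reduce n mu lam hlam hper b hb, h1]

theorem pv_last_getD (l : List Int) (x : Int) :
    (PySem.List.pyGet? (l ++ [x]) (-1)).getD 0 = x := by
  simp [PySem.List.pyGet?, PySem.List.pyIdx?]

-- A's loop counts exactly up to the first repeat index mu + lam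
theorem pv_aloop (n : Int) (mu lam : Nat) (hlam : 1 ≤ lam)
    (hper : ∀ i, mu ≤ i → pvSeq n (i + lam) = pvSeq n i)
    (hinj : ∀ i j, i < mu + lam → j < mu + lam → pvSeq n i = pvSeq n j → i = j) :
    ∀ fuel k, k < mu + lam → mu + lam - k ≤ fuel →
      pvALoop fuel ((List.range (k + 1)).map (pvSeq n)) ((k : Int) + 1)
        = ((mu + lam : Nat) : Int) + 1 := by
  intro fuel
  induction fuel with
  | zero => intro k h1 h2; omega
  | succ fuel ih =>
    intro k h1 h2
    have hrange : (List.range (k + 1)).map (pvSeq n)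
        = (List.range k).map (pvSeq n) ++ [pvSeq n k] := by
      simp [List.range_succ]
    rw [hrange]
    conv_lhs => rw [pvALoop]
    simp only [pv_last_getD]
    rw [show pvStepA (pvSeq n k) = pvSeq n (k + 1) from rfl]
    simp only [PySem.List.count]
    have hcount : List.count (pvSeq n (k + 1))
        (((List.range k).map (pvSeq n) ++ [pvSeq n k]) ++ [pvSeq n (k + 1)])
        = List.count (pvSeq n (k + 1)) ((List.range k).map (pvSeq n) ++ [pvSeq n k]) + 1 := by
      rw [← List.concat_eq_append, List.count_concat_self]
    simp only [hcount]
    have hmemiff : pvSeq n (k + 1) ∈ (List.range k).map (pvSeq n) ++ [pvSeq n k]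
        ↔ ∃ j, j < k + 1 ∧ pvSeq n j = pvSeq n (k + 1) := by
      rw [← hrange]
      simp [List.mem_map, List.mem_range]
    by_cases hmem : pvSeq n (k + 1) ∈ (List.range k).map (pvSeq n) ++ [pvSeq n k]
    · rw [if_pos]
      · -- the repeat happened: k + 1 = mu + lam
        obtain ⟨j, hj, hje⟩ := hmemiff.mp hmem
        have hk1 : k + 1 = mu + lam := by
          by_contra hne
          have hk1' : k + 1 < mu + lam := by omega
          have := hinj j (k + 1) (by omega) hk1' hje
          omega
        rw [show ((k : Int) + 1) + 1 = ((mu + lam : Nat) : Int) + 1 by push_cast; omega]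
      · have : 0 < List.count (pvSeq n (k + 1)) ((List.range k).map (pvSeq n) ++ [pvSeq n k]) :=
          List.count_pos_iff.mpr hmem
        omega
    · rw [if_neg]
      · have hk1 : k + 1 < mu + lam := by
          by_contra hge
          have hk1 : k + 1 = mu + lam := by omega
          exact hmem (hmemiff.mpr ⟨mu, by omega,
            by rw [hk1]; exact (hper mu (le_refl mu)).symm⟩)
        have hlist : ((List.range k).map (pvSeq n) ++ [pvSeq n k]) ++ [pvSeq n (k + 1)]
            = (List.range (k + 1 + 1)).map (pvSeq n) := by
          rw [← hrange]
          simp [List.range_succ]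
        rw [hlist, show ((k : Int) + 1) + 1 = ((k + 1 : Nat) : Int) + 1 by push_cast; ring]
        exact ih (k + 1) hk1 (by omega)
      · have : List.count (pvSeq n (k + 1)) ((List.range k).map (pvSeq n) ++ [pvSeq n k]) = 0 :=
          List.count_eq_zero.mpr hmem
        omega

-- phase 1 finds the first meeting index M (least i ≥ 1 with mu ≤ i and lam ∣ i)
theorem pv_floyd1 (n : Int) (mu lam M : Nat)
    (he1 : ∀ i, 1 ≤ i → (pvSeq n i = pvSeq n (2 * i) ↔ (mu ≤ i ∧ lam ∣ i)))
    (hM : 1 ≤ M ∧ mu ≤ M ∧ lam ∣ M)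
    (hmin : ∀ i, i < M → ¬(1 ≤ i ∧ mu ≤ i ∧ lam ∣ i)) :
    ∀ d i, 1 ≤ i → i ≤ M → M - i ≤ d →
      pvFloyd1 d (pvSeq n i) (pvSeq n (2 * i)) = pvSeq n (2 * M) := by
  intro d
  induction d with
  | zero =>
    intro i h1 hle hd
    have : i = M := by omega
    subst this
    rfl
  | succ d ih =>
    intro i h1 hle hd
    rw [pvFloyd1]
    by_cases heq : pvSeq n i = pvSeq n (2 * i)
    · rw [if_pos heq]
      have hCi := (he1 i h1).mp heq
      have : i = M := by
        by_contra hne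
        exact hmin i (by omega) ⟨h1, hCi.1, hCi.2⟩
      subst this
      rfl
    · rw [if_neg heq]
      have hiM : i < M := by
        rcases eq_or_lt_of_le hle with rfl | h
        · exact absurd ((he1 i h1).mpr ⟨hM.2.1, hM.2.2⟩) heq
        · exact h
      rw [show pvStepB (pvSeq n i) = pvSeq n (i + 1) from rfl,
          show pvStepB (pvStepB (pvSeq n (2 * i))) = pvSeq n (2 * i + 2) from rfl,
          show 2 * i + 2 = 2 * (i + 1) by ring]
      exact ih (i + 1) (by omega) (by omega) (by omega)

-- phase 2 counts the tail length mu
theorem pv_floyd2 (n : Int) (mu lam M : Nat)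
    (he2 : ∀ j, (pvSeq n j = pvSeq n (2 * M + j) ↔ mu ≤ j)) :
    ∀ d j, j ≤ mu → mu - j ≤ d →
      pvFloyd2 d (j : Int) (pvSeq n j) (pvSeq n (2 * M + j)) = ((mu : Int), pvSeq n mu) := by
  intro d
  induction d with
  | zero =>
    intro j hle hd
    have : j = mu := by omega
    subst this
    rfl
  | succ d ih =>
    intro j hle hd
    rw [pvFloyd2]
    by_cases heq : pvSeq n j = pvSeq n (2 * M + j)
    · rw [if_pos heq]
      have : j = mu := by have := (he2 j).mp heq; omega
      subst this
      rfl
    · rw [if_neg heq]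
      have hjmu : j < mu := by
        rcases eq_or_lt_of_le hle with rfl | h
        · exact absurd ((he2 j).mpr (le_refl j)) heq
        · exact h
      rw [show pvStepB (pvSeq n j) = pvSeq n (j + 1) from rfl,
          show pvStepB (pvSeq n (2 * M + j)) = pvSeq n (2 * M + (j + 1)) from rfl,
          show ((j : Int) + 1) = ((j + 1 : Nat) : Int) by push_cast; ring]
      exact ih (j + 1) (by omega) (by omega)

-- phase 3 counts the cycle length lam
theorem pv_floyd3 (n : Int) (mu lam : Nat) (hlam : 1 ≤ lam)
    (he3 : ∀ k, 1 ≤ k → (pvSeq n mu = pvSeq n (mu + k) ↔ lam ∣ k)) :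
    ∀ d k, 1 ≤ k → k ≤ lam → lam - k ≤ d →
      pvFloyd3 d (k : Int) (pvSeq n mu) (pvSeq n (mu + k)) = (lam : Int) := by
  intro d
  induction d with
  | zero =>
    intro k h1 hle hd
    have : k = lam := by omega
    subst this
    rfl
  | succ d ih =>
    intro k h1 hle hd
    rw [pvFloyd3]
    by_cases heq : pvSeq n mu = pvSeq n (mu + k)
    · rw [if_pos heq]
      have hdvd := (he3 k h1).mp heq
      have : k = lam := by
        have := Nat.le_of_dvd (by omega) hdvd
        omega
      subst this
      rfl
    · rw [if_neg heq]
      have hklam : k < lam := by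
        rcases eq_or_lt_of_le hle with rfl | h
        · exact absurd ((he3 k h1).mpr dvd_rfl) heq
        · exact h
      rw [show pvStepB (pvSeq n (mu + k)) = pvSeq n (mu + (k + 1)) from rfl,
          show ((k : Int) + 1) = ((k + 1 : Nat) : Int) by push_cast; ring]
      exact ih (k + 1) (by omega) (by omega) (by omega)

-- ===== VERDICT (by name: the statement is the Claim_ definition above) =====
theorem squareDigitsSequence_spec : Claim_equal_squareDigitsSequence := by
  intro n hdom hpre
  unfold Spec_squareDigitsSequence
  have hpre' : 0 ≤ n := hpre
  have hB : n ≤ 2147483648 := by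
    simp only [Dom_squareDigitsSequence, pvDomInt, decide_eq_true_eq] at hdom
    exact hdom.2
  obtain ⟨mu, lam, hlam, hNle, hper, hinj⟩ := pv_exists_cycle n hpre' hB
  have hchar := pv_char n mu lam hlam hper hinj
  -- the first Floyd meeting index M
  have hwC : 1 ≤ lam * (mu + 1) ∧ mu ≤ lam * (mu + 1) ∧ lam ∣ lam * (mu + 1) := by
    refine ⟨?_, ?_, ⟨mu + 1, rfl⟩⟩
    · exact Nat.mul_pos (show 0 < lam by omega) (Nat.succ_pos mu)
    · exact le_trans (Nat.le_succ mu) (Nat.le_mul_of_pos_left (mu + 1) (show 0 < lam by omega))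
  set M := sInf {i | 1 ≤ i ∧ mu ≤ i ∧ lam ∣ i} with hMdef
  have hMC : 1 ≤ M ∧ mu ≤ M ∧ lam ∣ M := by
    have h := Nat.sInf_mem (⟨lam * (mu + 1), hwC⟩ :
      Set.Nonempty {i : Nat | 1 ≤ i ∧ mu ≤ i ∧ lam ∣ i})
    simpa [Set.mem_setOf_eq] using h
  have hMmin : ∀ i, i < M → ¬(1 ≤ i ∧ mu ≤ i ∧ lam ∣ i) := by
    intro i hi hC
    have : M ≤ i := Nat.sInf_le (show i ∈ {i : Nat | 1 ≤ i ∧ mu ≤ i ∧ lam ∣ i} from hC)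
    omega
  have hMle : M ≤ lam * (mu + 1) := Nat.sInf_le hwC
  have hMbig : M ≤ 661782 := by
    have h1 : lam ≤ 813 := by omega
    have h2 : mu + 1 ≤ 813 := by omega
    have := Nat.mul_le_mul h1 h2
    omega
  -- the three coincidence criteria
  have he1 : ∀ i, 1 ≤ i → (pvSeq n i = pvSeq n (2 * i) ↔ (mu ≤ i ∧ lam ∣ i)) := by
    intro i h1
    rw [hchar]
    constructor
    · rintro (heq | ⟨ha, hb, hm⟩)
      · omega
      · refine ⟨ha, ?_⟩
        have := (Nat.modEq_iff_dvd' (show i ≤ 2 * i by omega)).mp hm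
        rwa [show 2 * i - i = i by omega] at this
    · rintro ⟨ha, hdvd⟩
      right
      refine ⟨ha, by omega, ?_⟩
      exact (Nat.modEq_iff_dvd' (show i ≤ 2 * i by omega)).mpr
        (by rwa [show 2 * i - i = i by omega])
  have he2 : ∀ j, (pvSeq n j = pvSeq n (2 * M + j) ↔ mu ≤ j) := by
    intro j
    rw [hchar]
    constructor
    · rintro (heq | ⟨ha, _, _⟩)
      · omega
      · exact ha
    · intro hj
      right
      refine ⟨hj, by omega, ?_⟩
      have hd : lam ∣ 2 * M := Dvd.dvd.mul_left hMC.2.2 2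
      exact (Nat.modEq_iff_dvd' (show j ≤ 2 * M + j by omega)).mpr
        (by rwa [show 2 * M + j - j = 2 * M by omega])
  have he3 : ∀ k, 1 ≤ k → (pvSeq n mu = pvSeq n (mu + k) ↔ lam ∣ k) := by
    intro k h1
    rw [hchar]
    constructor
    · rintro (heq | ⟨_, _, hm⟩)
      · omega
      · have := (Nat.modEq_iff_dvd' (show mu ≤ mu + k by omega)).mp hm
        rwa [show mu + k - mu = k by omega] at this
    · intro hdvd
      right
      refine ⟨le_refl mu, by omega, ?_⟩
      exact (Nat.modEq_iff_dvd' (show mu ≤ mu + k by omega)).mpr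
        (by rwa [show mu + k - mu = k by omega])
  -- A's value
  have hA : squareDigitsSequence n = ((mu + lam : Nat) : Int) + 1 := by
    have h := pv_aloop n mu lam hlam hper hinj 1000000 0 (by omega) (by omega)
    exact h
  -- B's value
  have hf1 : pvFloyd1 1000000 (pvStepB n) (pvStepB (pvStepB n)) = pvSeq n (2 * M) := by
    have h := pv_floyd1 n mu lam M he1 hMC hMmin 1000000 1 (le_refl 1) (by omega) (by omega)
    exact h
  have hf2 : pvFloyd2 1000000 0 n (pvSeq n (2 * M)) = ((mu : Int), pvSeq n mu) := by
    have h := pv_floyd2 n mu lam M he2 1000000 0 (Nat.zero_le mu) (by omega)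
    exact h
  have hf3 : pvFloyd3 1000000 1 (pvSeq n mu) (pvStepB (pvSeq n mu)) = (lam : Int) := by
    have h := pv_floyd3 n mu lam hlam he3 1000000 1 (le_refl 1) hlam (by omega)
    exact h
  have hBval : squareDigitsSequence_alt n = (mu : Int) + (lam : Int) + 1 := by
    simp only [squareDigitsSequence_alt, hf1, hf2, hf3]
  rw [hA, hBval]
  push_cast
  ring
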